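-- pv_equiv track=rewrite | github.com/Aries99C/Clean4MTS | DQDiscovery/LearnCRR/database.py | dc2fd
-- ===== SOURCE A (Python) =====
-- def isfd(dc):
--     if len(dc) == 0:
--         return False
--     if dc[0] is True or dc[0] is False:
--         dc = dc[1]
--     for pred in dc:
--         if pred[3] != 1 or pred[2] not in ["=", "!="]:
--             return False
--     return True
--
-- def fdfromdc(dc):
--     if dc[0] is True or dc[0] is False:
--         dc = dc[1]
--     l, r = [], []
--     for pred in dc:
--         if pred[2] == "=": l.append(pred[0])
--         elif pred[2] == "!=": r.append(pred[0])
--     return l, r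
--
-- def dc2fd(dcs):
--     ans, index = [], []
--     for i in range(len(dcs)):
--         single, dc = dcs[i]
--         if single or not isfd(dc): continue
--         ans.append(fdfromdc(dc))
--         index.append(i)
--     return ans, index
-- ===== SOURCE B (Python) =====
-- def dc2fd(dcs):
--     ans, index = [], []
--     for i, (single, dc) in enumerate(dcs):
--         if single or not dc:
--             continue
--         l, r, ok = [], [], True
--         for attr, _, op, flag in dc:
--             if flag != 1:
--                 ok = False
--                 break
--             if op == "=":
--                 l.append(attr)
--             elif op == "!=":
--                 r.append(attr)
--             else:
--                 ok = False
--                 break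
--         if ok:
--             ans.append((l, r))
--             index.append(i)
--     return ans, index
-- ===== Notes on version B (the rewrite author's own statement) =====
-- stated objective: alternative
-- what changed: A validates each dc with one full scan (isfd) and then extracts (l,r) with a second scan (fdfromdc); B makes a single fused scan per dc that builds l and r while validating and abandons the dc at the first invalid predicate, iterating via enumerate instead of range+indexing.
import Mathlib
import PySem

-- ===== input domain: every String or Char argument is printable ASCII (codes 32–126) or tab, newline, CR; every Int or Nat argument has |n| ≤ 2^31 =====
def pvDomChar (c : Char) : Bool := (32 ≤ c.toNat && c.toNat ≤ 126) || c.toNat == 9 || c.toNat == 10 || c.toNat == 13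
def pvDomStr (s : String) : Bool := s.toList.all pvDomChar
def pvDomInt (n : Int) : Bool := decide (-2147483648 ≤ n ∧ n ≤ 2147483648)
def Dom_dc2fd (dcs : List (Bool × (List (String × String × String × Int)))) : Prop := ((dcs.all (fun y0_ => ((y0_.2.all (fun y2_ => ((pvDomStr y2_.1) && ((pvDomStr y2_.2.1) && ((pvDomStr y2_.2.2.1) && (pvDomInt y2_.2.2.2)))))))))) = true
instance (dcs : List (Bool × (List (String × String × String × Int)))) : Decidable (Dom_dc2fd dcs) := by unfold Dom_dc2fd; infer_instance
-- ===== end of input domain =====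

-- B fuses A's two scans per dc (validate, then extract) into one pass that builds
-- (l, r) while validating and abandons the dc at the first invalid predicate.

-- ===== PORT A =====
-- In A, 'dc[0] is True or dc[0] is False' never holds here: dc's elements are
-- 4-tuples, never booleans, so the unwrap branch is dead and is omitted.

-- the 'for pred in dc' loop of isfd, with its early 'return False'
def pvIsfdLoop (preds : List (String × String × String × Int)) : Bool :=
  match preds with
  | [] => true
  | p :: rest =>
    if p.2.2.2 ≠ 1 ∨ (p.2.2.1 ≠ "=" ∧ p.2.2.1 ≠ "!=") then false else pvIsfdLoop rest

def pvIsfd (dc : List (String × String × String × Int)) : Bool :=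
  if dc.length = 0 then false else pvIsfdLoop dc

def pvFdfromdc (dc : List (String × String × String × Int)) : List String × List String :=
  dc.foldl
    (fun lr p =>
      if p.2.2.1 = "=" then (lr.1 ++ [p.1], lr.2)
      else if p.2.2.1 = "!=" then (lr.1, lr.2 ++ [p.1])
      else lr)
    ([], [])

-- the 'for i in range(len(dcs))' loop of dc2fd, iterated over the list with index i
def pvALoop (dcs : List (Bool × (List (String × String × String × Int)))) (i : Nat)
    (ans : List (List String × List String)) (index : List Int) :
    (List (List String × List String)) × List Int :=
  match dcs with
  | [] => (ans, index)
  | (single, dc) :: rest =>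
    if single || !pvIsfd dc then pvALoop rest (i + 1) ans index
    else pvALoop rest (i + 1) (ans ++ [pvFdfromdc dc]) (index ++ [(i : Int)])

def dc2fd (dcs : List (Bool × (List (String × String × String × Int)))) : (List (List String × List String)) × List Int :=
  pvALoop dcs 0 [] []

-- ===== PORT B =====
-- the fused inner loop of B: builds (l, r) while validating; none = 'ok = False'
def pvScan (preds : List (String × String × String × Int)) (l r : List String) :
    Option (List String × List String) :=
  match preds with
  | [] => some (l, r)
  | p :: rest =>
    if p.2.2.2 ≠ 1 then none
    else if p.2.2.1 = "=" then pvScan rest (l ++ [p.1]) r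
    else if p.2.2.1 = "!=" then pvScan rest l (r ++ [p.1])
    else none

-- the 'for i, (single, dc) in enumerate(dcs)' loop of B
def pvBLoop (dcs : List (Bool × (List (String × String × String × Int)))) (i : Nat)
    (acc : (List (List String × List String)) × List Int) :
    (List (List String × List String)) × List Int :=
  match dcs with
  | [] => acc
  | (single, dc) :: rest =>
    if single || dc.isEmpty then pvBLoop rest (i + 1) acc
    else
      match pvScan dc [] [] with
      | some lr => pvBLoop rest (i + 1) (acc.1 ++ [lr], acc.2 ++ [(i : Int)])
      | none => pvBLoop rest (i + 1) acc

def dc2fd_alt (dcs : List (Bool × (List (String × String × String × Int)))) : (List (List String × List String)) × List Int :=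
  pvBLoop dcs 0 ([], [])

-- ===== PRECONDITION & SPEC =====
def Spec_dc2fd (dcs : List (Bool × (List (String × String × String × Int)))) (out : (List (List String × List String)) × List Int) : Prop := out = dc2fd_alt dcs
instance (dcs : List (Bool × (List (String × String × String × Int)))) (out : (List (List String × List String)) × List Int) : Decidable (Spec_dc2fd dcs out) := by unfold Spec_dc2fd; infer_instance

-- ===== CLAIM (what is proved, stated in full; the proofs are below) =====
def Claim_equal_dc2fd : Prop := ∀ (dcs : List (Bool × (List (String × String × String × Int)))), Dom_dc2fd dcs → Spec_dc2fd dcs (dc2fd dcs)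

-- ===== LEMMAS AND PROOFS =====

-- B's fused scan = A's validation followed by A's extraction fold, for any accumulators
theorem pvScan_eq (preds : List (String × String × String × Int)) (l r : List String) :
    pvScan preds l r =
      if pvIsfdLoop preds then
        some (preds.foldl
          (fun lr p =>
            if p.2.2.1 = "=" then (lr.1 ++ [p.1], lr.2)
            else if p.2.2.1 = "!=" then (lr.1, lr.2 ++ [p.1])
            else lr)
          (l, r))
      else none := by
  induction preds generalizing l r with
  | nil => simp [pvScan, pvIsfdLoop]
  | cons p rest ih =>
    simp only [pvScan, pvIsfdLoop, List.foldl_cons]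
    by_cases h1 : p.2.2.2 = 1
    · by_cases h2 : p.2.2.1 = "="
      · simp [h1, h2, ih]
      · by_cases h3 : p.2.2.1 = "!="
        · simp [h1, h3, ih]
        · simp [h1, h2, h3]
    · simp [h1]

-- the two outer loops agree for any index and accumulators
theorem pvLoop_eq (dcs : List (Bool × (List (String × String × String × Int)))) (i : Nat)
    (ans : List (List String × List String)) (index : List Int) :
    pvALoop dcs i ans index = pvBLoop dcs i (ans, index) := by
  induction dcs generalizing i ans index with
  | nil => rfl
  | cons hd rest ih =>
    obtain ⟨single, dc⟩ := hd
    simp only [pvALoop, pvBLoop]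
    cases single with
    | true => simp [ih]
    | false =>
      cases dc with
      | nil => simp [pvIsfd, ih]
      | cons p ps =>
        simp only [Bool.false_or, List.isEmpty_cons, pvIsfd, List.length_cons]
        rw [pvScan_eq]
        by_cases hfd : pvIsfdLoop (p :: ps)
        · simp [hfd, ih, pvFdfromdc]
        · simp [hfd, ih]

-- ===== VERDICT (by name: the statement is the Claim_ definition above) =====
theorem dc2fd_spec : Claim_equal_dc2fd := by
  intro dcs _
  unfold Spec_dc2fd dc2fd dc2fd_alt
  exact pvLoop_eq dcs 0 [] []
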